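-- pv_equiv track=rewrite | github.com/agiallombardo/promptDeck | backend/app/services/zip_safety.py | is_safe_bundle_path
-- ===== SOURCE A (Python) =====
-- def is_safe_bundle_path(name: str) -> bool:
--     """
--     Return False if `name` (archive member path) could escape the extraction root.
--     Reject '..', POSIX-absolute paths, and empty / all-dot segments.
--     """
--     raw = name.replace("\\", "/").strip()
--     if raw.startswith("/"):
--         return False
--     norm = raw.strip("/")
--     if not norm:
--         return False
--     for segment in norm.split("/"):
--         if segment in ("", ".", ".."):
--             return False
--         if segment.startswith("/"):
--             return False
--     return True
-- ===== SOURCE B (Python) =====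
-- def is_safe_bundle_path(name: str) -> bool:
--     """
--     Return False if `name` (archive member path) could escape the extraction root.
--     Reject '..', POSIX-absolute paths, and empty / all-dot segments.
--     """
--     raw = name.replace("\\", "/").strip()
--     if raw.startswith("/"):
--         return False
--     padded = "/" + raw.strip("/") + "/"
--     return not ("//" in padded or "/./" in padded or "/../" in padded)
-- ===== Notes on version B (the rewrite author's own statement) =====
-- stated objective: simpler
-- what changed: Replaced the split-into-segments loop (with its per-segment membership and startswith tests and the separate empty-norm check) by three substring tests ('//', '/./', '/../') on the slash-padded normalized path, which subsume the empty and per-segment cases.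
import Mathlib
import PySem

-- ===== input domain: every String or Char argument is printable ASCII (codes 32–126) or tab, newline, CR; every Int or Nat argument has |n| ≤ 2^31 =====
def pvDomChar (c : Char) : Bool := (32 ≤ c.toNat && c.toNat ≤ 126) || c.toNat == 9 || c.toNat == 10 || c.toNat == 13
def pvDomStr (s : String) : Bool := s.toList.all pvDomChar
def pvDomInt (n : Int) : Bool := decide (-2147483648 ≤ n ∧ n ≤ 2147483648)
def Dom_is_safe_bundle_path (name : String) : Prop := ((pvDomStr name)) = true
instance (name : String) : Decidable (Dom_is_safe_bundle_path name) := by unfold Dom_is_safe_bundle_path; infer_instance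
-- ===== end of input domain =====

-- B replaces A's split-segments loop by three substring tests on the slash-padded path (simpler, same O(n) cost).


-- ===== PORT A =====
-- the 'for segment in norm.split("/")' loop with its early returns
def pvCheckSegs : List (List Char) → Bool
  | [] => true
  | seg :: rest =>
    if seg = [] ∨ seg = ['.'] ∨ seg = ['.', '.'] then false
    else if PySem.Chars.startswith seg ['/'] then false
    else pvCheckSegs rest

def is_safe_bundle_path (name : String) : Bool :=
  let raw := PySem.Str.strip (PySem.Str.replace name "\\" "/")
  if PySem.Str.startswith raw "/" then false
  else
    let norm := PySem.Str.stripChars raw "/"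
    if norm.toList.isEmpty then false
    else pvCheckSegs (PySem.Chars.splitOn norm.toList ['/'])

-- ===== PORT B =====
def is_safe_bundle_path_alt (name : String) : Bool :=
  let raw := PySem.Str.strip (PySem.Str.replace name "\\" "/")
  if PySem.Str.startswith raw "/" then false
  else
    let padded := '/' :: (PySem.Str.stripChars raw "/").toList ++ ['/']
    !(PySem.Chars.isIn ['/', '/'] padded || PySem.Chars.isIn ['/', '.', '/'] padded ||
      PySem.Chars.isIn ['/', '.', '.', '/'] padded)

-- ===== PRECONDITION & SPEC =====
def Spec_is_safe_bundle_path (name : String) (out : Bool) : Prop := out = is_safe_bundle_path_alt name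
instance (name : String) (out : Bool) : Decidable (Spec_is_safe_bundle_path name out) := by unfold Spec_is_safe_bundle_path; infer_instance

-- ===== CLAIM (what is proved, stated in full; the proofs are below) =====
def Claim_equal_is_safe_bundle_path : Prop := ∀ (name : String), Dom_is_safe_bundle_path name → Spec_is_safe_bundle_path name (is_safe_bundle_path name)

-- ===== LEMMAS AND PROOFS =====

-- reference single-char split: pvSplit pre l = the segments of (pre ++ l) split on '/'
def pvSplit (pre : List Char) : List Char → List (List Char)
  | [] => [pre]
  | c :: rest => if c = '/' then pre :: pvSplit [] rest else pvSplit (pre ++ [c]) rest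

theorem pv_go_eq : ∀ (fuel : Nat) (l cur : List Char) (acc : List (List Char)), l.length < fuel →
    PySem.Chars.splitOn.go ['/'] fuel l cur acc = acc.reverse ++ pvSplit cur.reverse l := by
  intro fuel
  induction fuel with
  | zero => intro l cur acc h; omega
  | succ f ih =>
    intro l cur acc h
    cases l with
    | nil => simp [PySem.Chars.splitOn.go, pvSplit]
    | cons c rest =>
      by_cases hc : c = '/'
      · subst hc
        have hp : List.isPrefixOf ['/'] ('/' :: rest) = true := by simp [List.isPrefixOf]
        simp only [PySem.Chars.splitOn.go, hp, if_true]
        rw [ih _ _ _ (by simp at h ⊢; omega)]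
        simp [pvSplit]
      · have hp : List.isPrefixOf ['/'] (c :: rest) = false := by
          simp [List.isPrefixOf]; exact fun hcc => (hc hcc.symm).elim
        simp only [PySem.Chars.splitOn.go, hp, Bool.false_eq_true, if_false]
        rw [ih _ _ _ (by simp at h ⊢; omega)]
        simp [pvSplit, hc]

theorem pv_splitOn_eq (n : List Char) : PySem.Chars.splitOn n ['/'] = pvSplit [] n := by
  have := pv_go_eq (n.length + 1) n [] [] (by omega)
  simpa [PySem.Chars.splitOn] using this

theorem pv_flat (l : List Char) : ∀ pre, (pvSplit pre l).flatMap (· ++ ['/']) = pre ++ l ++ ['/'] := by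
  induction l with
  | nil => intro pre; simp [pvSplit]
  | cons c rest ih =>
    intro pre
    by_cases hc : c = '/'
    · subst hc; simp [pvSplit, ih]
    · simp [pvSplit, hc, ih]

theorem pv_slashfree (l : List Char) : ∀ pre, '/' ∉ pre → ∀ s ∈ pvSplit pre l, '/' ∉ s := by
  induction l with
  | nil => intro pre hpre s hs; simp [pvSplit] at hs; subst hs; exact hpre
  | cons c rest ih =>
    intro pre hpre s hs
    by_cases hc : c = '/'
    · subst hc
      simp only [pvSplit, if_true, List.mem_cons] at hs
      rcases hs with hs | hs
      · subst hs; exact hpre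
      · exact ih [] (by simp) s hs
    · simp only [pvSplit, hc, if_false] at hs
      refine ih (pre ++ [c]) ?_ s hs
      simp only [List.mem_append, List.mem_singleton]
      rintro (h | h)
      · exact hpre h
      · exact hc h.symm

theorem pv_ne_nil (l : List Char) : ∀ pre, pvSplit pre l ≠ [] := by
  induction l with
  | nil => intro pre; simp [pvSplit]
  | cons c rest ih =>
    intro pre
    by_cases hc : c = '/'
    · subst hc; simp [pvSplit]
    · simp only [pvSplit, hc, if_false]; exact ih _

-- prefix alignment on '/'-free blocks
theorem pv_prefix_align (pat : List Char) : ∀ (s u t : List Char), '/' ∉ pat → '/' ∉ s →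
    pat ++ '/' :: u <+: s ++ '/' :: t → pat = s := by
  induction pat with
  | nil =>
    intro s u t _ hs h
    cases s with
    | nil => rfl
    | cons c s' =>
      rcases h with ⟨r, hr⟩
      simp only [List.nil_append, List.cons_append, List.cons.injEq] at hr
      simp only [List.mem_cons] at hs
      exact (hs (Or.inl hr.1)).elim
  | cons p pat' ih =>
    intro s u t hp hs h
    cases s with
    | nil =>
      rcases h with ⟨r, hr⟩
      simp only [List.cons_append, List.nil_append, List.cons.injEq] at hr
      simp only [List.mem_cons] at hp
      exact (hp (Or.inl hr.1.symm)).elim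
    | cons c s' =>
      rcases h with ⟨r, hr⟩
      simp only [List.cons_append, List.cons.injEq] at hr
      obtain ⟨h1, h2⟩ := hr
      have hp' : '/' ∉ pat' := fun hx => hp (by simp [hx])
      have hs' : '/' ∉ s' := fun hx => hs (by simp [hx])
      have := ih s' u t hp' hs' ⟨r, by simpa using h2⟩
      rw [h1, this]

-- the key correspondence: '/pat/' occurs in the padded path iff pat is one of the segments
theorem pv_infix_iff (pat : List Char) (hpat : '/' ∉ pat) :
    ∀ segs : List (List Char), segs ≠ [] → (∀ s ∈ segs, '/' ∉ s) →
    (('/' :: pat ++ ['/']) <:+: ('/' :: segs.flatMap (· ++ ['/'])) ↔ pat ∈ segs) := by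
  intro segs
  induction segs with
  | nil => intro h; exact absurd rfl h
  | cons s rest ih =>
    intro _ hfree
    have hs : '/' ∉ s := hfree s (by simp)
    have hrestfree : ∀ x ∈ rest, '/' ∉ x := fun x hx => hfree x (by simp [hx])
    have hrest_ne : rest.flatMap (· ++ ['/']) ≠ [] → rest ≠ [] := by
      intro hF hR; subst hR; simp at hF
    constructor
    · intro hinf
      rcases hinf with ⟨a, b, hab⟩
      have hflat : (s :: rest).flatMap (· ++ ['/']) = s ++ '/' :: rest.flatMap (· ++ ['/']) := by
        simp
      rw [hflat] at hab
      set F := rest.flatMap (· ++ ['/']) with hF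
      cases a with
      | nil =>
        -- '/'::pat++['/'] ++ b = '/'::(s ++ '/'::F)
        simp only [List.nil_append, List.cons_append, List.cons.injEq] at hab
        have heq : pat ++ '/' :: b = s ++ '/' :: F := by
          have := hab.2
          simpa [List.append_assoc] using this
        have hps : pat = s := pv_prefix_align pat s b F hpat hs ⟨[], by simp [heq]⟩
        simp [hps]
      | cons x a' =>
        have hx : x = '/' := by
          have := hab
          simp only [List.cons_append, List.cons.injEq] at this
          exact this.1
        have hab' : a' ++ (('/' :: pat ++ ['/']) ++ b) = s ++ '/' :: F := by
          have := hab
          simp only [List.cons_append, List.cons.injEq] at this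
          simpa [List.append_assoc] using this.2
        rcases List.append_eq_append_iff.mp hab' with ⟨k, hk1, hk2⟩ | ⟨k, hk1, hk2⟩
        · -- s = a' ++ k, ('/'::pat++['/']) ++ b = k ++ '/'::F
          cases k with
          | nil =>
            simp only [List.nil_append] at hk2
            have hFeq : F = pat ++ ['/'] ++ b := by
              have := hk2
              simp only [List.cons_append, List.cons.injEq] at this
              simpa [List.append_assoc] using this.2.symm
            have hFne : F ≠ [] := by rw [hFeq]; simp
            right
            refine (ih (hrest_ne hFne) hrestfree).mp ?_
            exact ⟨[], b, by simp [hFeq, List.append_assoc]⟩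
          | cons y k' =>
            have hy : y = '/' := by
              have := hk2
              simp only [List.cons_append, List.cons.injEq] at this
              exact this.1.symm
            exact absurd (by rw [hk1, hy]; simp) hs
        · -- a' = s ++ k, '/'::F = k ++ (('/'::pat++['/']) ++ b)
          cases k with
          | nil =>
            simp only [List.nil_append] at hk2
            have hFeq : F = pat ++ ['/'] ++ b := by
              have := hk2
              simp only [List.cons_append, List.cons.injEq] at this
              simpa [List.append_assoc] using this.2
            have hFne : F ≠ [] := by rw [hFeq]; simp
            right
            refine (ih (hrest_ne hFne) hrestfree).mp ?_
            exact ⟨[], b, by simp [hFeq, List.append_assoc]⟩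
          | cons y k' =>
            have hy : y = '/' := by
              have := hk2
              simp only [List.cons_append, List.cons.injEq] at this
              exact this.1.symm
            have hFeq : F = k' ++ ('/' :: pat ++ ['/']) ++ b := by
              have := hk2
              simp only [List.cons_append, List.cons.injEq] at this
              simpa [List.append_assoc] using this.2
            have hFne : F ≠ [] := by rw [hFeq]; simp
            right
            refine (ih (hrest_ne hFne) hrestfree).mp ?_
            have : ('/' :: pat ++ ['/']) <:+: F := ⟨k', b, by simp [hFeq, List.append_assoc]⟩
            exact this.trans ⟨['/'], [], by simp⟩
    · intro hmem
      have hflat : '/' :: (s :: rest).flatMap (· ++ ['/']) =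
          ('/' :: s ++ ['/']) ++ rest.flatMap (· ++ ['/']) := by simp
      rcases List.mem_cons.mp hmem with hps | hps
      · subst hps
        exact ⟨[], rest.flatMap (· ++ ['/']), by rw [hflat]; simp⟩
      · have hne : rest ≠ [] := by intro h; subst h; simp at hps
        have hinf := (ih hne hrestfree).mpr hps
        refine hinf.trans ?_
        refine List.IsSuffix.isInfix ⟨'/' :: s, ?_⟩
        simp
  
theorem pv_checkSegs_iff : ∀ segs : List (List Char), (∀ s ∈ segs, '/' ∉ s) →
    (pvCheckSegs segs = true ↔ ∀ s ∈ segs, ¬(s = [] ∨ s = ['.'] ∨ s = ['.', '.'])) := by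
  intro segs
  induction segs with
  | nil => intro _; simp [pvCheckSegs]
  | cons seg rest ih =>
    intro h
    have hseg : '/' ∉ seg := h seg (by simp)
    have hrest : ∀ s ∈ rest, '/' ∉ s := fun s hs => h s (by simp [hs])
    by_cases hb : seg = [] ∨ seg = ['.'] ∨ seg = ['.', '.']
    · simp only [pvCheckSegs, hb, if_true]
      constructor
      · intro hf; exact absurd hf (by simp)
      · intro hall; exact absurd hb (hall seg (by simp))
    · have hsw : PySem.Chars.startswith seg ['/'] = false := by
        rw [Bool.eq_false_iff]
        intro hT
        rw [PySem.Chars.startswith_iff] at hT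
        exact hseg (hT.subset (by simp))
      simp only [pvCheckSegs, hb, if_false, hsw, Bool.false_eq_true, List.forall_mem_cons]
      rw [ih hrest]
      simp

-- the core equivalence over the normalized character list
theorem pv_core (n : List Char) :
    (if n.isEmpty then false else pvCheckSegs (PySem.Chars.splitOn n ['/'])) =
    (!(PySem.Chars.isIn ['/', '/'] ('/' :: n ++ ['/']) || PySem.Chars.isIn ['/', '.', '/'] ('/' :: n ++ ['/']) ||
       PySem.Chars.isIn ['/', '.', '.', '/'] ('/' :: n ++ ['/']))) := by
  by_cases hn : n = []
  · subst hn; decide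
  · rw [pv_splitOn_eq]
    have hfree := pv_slashfree n [] (by simp)
    have hne := pv_ne_nil n []
    have hpad : ('/' :: n ++ ['/']) = '/' :: (pvSplit [] n).flatMap (· ++ ['/']) := by
      rw [pv_flat n []]; simp
    rw [List.isEmpty_eq_false_iff.mpr hn, if_neg (by simp), hpad]
    have e1 : (['/', '/'] : List Char) = '/' :: [] ++ ['/'] := rfl
    have e2 : (['/', '.', '/'] : List Char) = '/' :: ['.'] ++ ['/'] := rfl
    have e3 : (['/', '.', '.', '/'] : List Char) = '/' :: ['.', '.'] ++ ['/'] := rfl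
    rw [Bool.eq_iff_iff, pv_checkSegs_iff _ hfree]
    simp only [Bool.not_eq_eq_eq_not, Bool.not_true, Bool.or_eq_false_iff,
      PySem.Chars.isIn_eq_false_iff, e1, e2, e3]
    rw [pv_infix_iff [] (by simp) _ hne hfree,
        pv_infix_iff ['.'] (by simp) _ hne hfree,
        pv_infix_iff ['.', '.'] (by simp) _ hne hfree]
    constructor
    · intro hall
      refine ⟨⟨fun hm => hall _ hm (by simp), fun hm => hall _ hm (by simp)⟩,
        fun hm => hall _ hm (by simp)⟩
    · rintro ⟨⟨h1, h2⟩, h3⟩ s hs hbad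
      rcases hbad with rfl | rfl | rfl
      · exact h1 hs
      · exact h2 hs
      · exact h3 hs

-- ===== VERDICT (by name: the statement is the Claim_ definition above) =====
theorem is_safe_bundle_path_spec : Claim_equal_is_safe_bundle_path := by
  intro name _
  unfold Spec_is_safe_bundle_path is_safe_bundle_path is_safe_bundle_path_alt
  by_cases h : PySem.Chars.startswith (PySem.Chars.strip (PySem.Chars.replace name.toList ['\\'] ['/'])) ['/'] = true
  · simp [h]
  · simp only [Bool.not_eq_true] at h
    simp [h]
    simpa using pv_core
      (PySem.Chars.stripChars (PySem.Chars.strip (PySem.Chars.replace name.toList ['\\'] ['/'])) ['/'])
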